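-- pv_equiv track=rewrite | github.com/dusktreader/site-nine | src/site_nine/cli/changelog.py | _extract_change_sections
-- ===== SOURCE A (Python) =====
-- def _extract_change_sections(content: str) -> dict[str, str]:
--     """Extract relevant sections from task markdown file
--
--     Focuses on implementation steps, files changed, and testing sections.
--     Ignores objective and problem statement since we want actual changes.
--     """
--     sections = {}
--     lines = content.split("\n")
--
--     current_section = None
--     section_content: list[str] = []
--
--     for line in lines:
--         # Check for section headers
--         if line.startswith("## Implementation Steps"):
--             if current_section and section_content:
--                 sections[current_section] = "\n".join(section_content).strip()
--             current_section = "implementation"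
--             section_content = []
--         elif line.startswith("## Files Changed"):
--             if current_section and section_content:
--                 sections[current_section] = "\n".join(section_content).strip()
--             current_section = "files_changed"
--             section_content = []
--         elif line.startswith("## Testing Performed") or line.startswith("## Testing"):
--             if current_section and section_content:
--                 sections[current_section] = "\n".join(section_content).strip()
--             current_section = "testing"
--             section_content = []
--         elif line.startswith("## "):
--             # End of current section
--             if current_section and section_content:
--                 sections[current_section] = "\n".join(section_content).strip()
--             current_section = None
--             section_content = []
--         elif current_section:
--             # Skip the header metadata section
--             if not line.startswith("**"):
--                 section_content.append(line)
--
--     # Add last section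
--     if current_section and section_content:
--         sections[current_section] = "\n".join(section_content).strip()
--
--     # Clean up sections - remove placeholder text
--     for key in sections:
--         content = sections[key]
--         if "[" in content and "]" in content:
--             # Contains placeholder like [description] or [file path]
--             # Only remove if the entire section is just placeholders
--             lines = [line.strip() for line in content.split("\n") if line.strip()]
--             if all(line.startswith("[") or line.startswith("-") or not line for line in lines):
--                 sections[key] = ""
--
--     # Remove empty sections
--     sections = {k: v for k, v in sections.items() if v}
--
--     return sections
-- ===== SOURCE B (Python) =====
-- def _extract_change_sections(content: str) -> dict[str, str]:
--     """Segment-based reimplementation: split into header-delimited blocks, then classify."""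
--     # 1. Group lines into header-delimited (header, block) segments; lines before the first header are dropped.
--     segments = []
--     block = None
--     for line in content.split("\n"):
--         if line.startswith("## "):
--             block = []
--             segments.append((line, block))
--         elif block is not None:
--             block.append(line)
--     # 2. Classify each header and build the sections (later duplicates overwrite).
--     sections = {}
--     for header, block in segments:
--         if header.startswith("## Implementation Steps"):
--             key = "implementation"
--         elif header.startswith("## Files Changed"):
--             key = "files_changed"
--         elif header.startswith("## Testing"):
--             key = "testing"
--         else:
--             continue
--         kept = [l for l in block if not l.startswith("**")]
--         if kept:
--             sections[key] = "\n".join(kept).strip()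
--     # 3. Placeholder cleanup and removal of empty sections.
--     for key, text in list(sections.items()):
--         if "[" in text and "]" in text:
--             stripped = [l.strip() for l in text.split("\n") if l.strip()]
--             if all(l.startswith("[") or l.startswith("-") for l in stripped):
--                 sections[key] = ""
--     return {k: v for k, v in sections.items() if v}
-- ===== Notes on version B (the rewrite author's own statement) =====
-- stated objective: alternative
-- what changed: Replaces A's single-pass state machine (current_section/section_content mutated per line) by a two-phase pipeline: first group lines into header-delimited (header, block) segments, then classify each segment's header and build the sections dict per segment; the placeholder cleanup drops A's redundant not-line disjunct and rewrites the dict by iterating its items snapshot.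
import Mathlib
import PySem

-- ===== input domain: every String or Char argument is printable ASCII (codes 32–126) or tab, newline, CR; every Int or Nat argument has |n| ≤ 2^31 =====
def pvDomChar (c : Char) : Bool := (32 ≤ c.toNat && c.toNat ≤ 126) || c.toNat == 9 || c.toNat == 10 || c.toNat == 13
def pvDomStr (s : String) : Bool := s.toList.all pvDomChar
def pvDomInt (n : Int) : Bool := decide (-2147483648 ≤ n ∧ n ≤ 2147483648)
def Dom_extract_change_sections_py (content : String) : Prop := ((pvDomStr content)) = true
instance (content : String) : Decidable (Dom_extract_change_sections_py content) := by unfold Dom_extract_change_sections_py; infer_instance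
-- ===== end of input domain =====

-- B re-implements A's single-pass state machine as a two-phase pipeline (segment into header-delimited
-- blocks, then classify each block); same return value, same O(n) cost ("alternative" objective).

-- ===== PORT A =====
-- flush: Python's 'if current_section and section_content: sections[current_section] = "\n".join(section_content).strip()'
def pvFlushA (d : PySem.Dict String String) (cur : Option String) (acc : List String) :
    PySem.Dict String String :=
  match cur with
  | some c => if c ≠ "" ∧ acc ≠ [] then d.insert c (PySem.Str.strip (PySem.Str.join "\n" acc)) else d
  | none => d

-- one iteration of A's main 'for line in lines' loop
def pvStepA : PySem.Dict String String × Option String × List String → String →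
    PySem.Dict String String × Option String × List String
  | (d, cur, acc), line =>
  if PySem.Str.startswith line "## Implementation Steps" then
    (pvFlushA d cur acc, some "implementation", [])
  else if PySem.Str.startswith line "## Files Changed" then
    (pvFlushA d cur acc, some "files_changed", [])
  else if PySem.Str.startswith line "## Testing Performed" || PySem.Str.startswith line "## Testing" then
    (pvFlushA d cur acc, some "testing", [])
  else if PySem.Str.startswith line "## " then
    (pvFlushA d cur acc, none, [])
  else
    match cur with
    | some c => (d, some c, if ¬ PySem.Str.startswith line "**" then acc ++ [line] else acc)
    | none => (d, none, acc)

-- A's placeholder test: '"[" in content and "]" in content' and the all(...) over stripped non-empty lines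
def pvCondA (c : String) : Bool :=
  if PySem.Str.isIn "[" c && PySem.Str.isIn "]" c then
    ((((PySem.Str.split? c "\n").getD []).map PySem.Str.strip).filter (fun l => l ≠ "")).all
      (fun l => PySem.Str.startswith l "[" || PySem.Str.startswith l "-" || l == "")
  else false

-- A's 'for key in sections: … sections[key] = ""'
def pvCleanupA (d : PySem.Dict String String) : PySem.Dict String String :=
  d.keys.foldl (fun d k =>
    match d.get? k with
    | some c => if pvCondA c then d.insert k "" else d
    | none => d) d

def extract_change_sections_py (content : String) : List (String × String) :=
  let lines := (PySem.Str.split? content "\n").getD []   -- sep "\n" ≠ "", so split? is always 'some'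
  let st := lines.foldl pvStepA (PySem.Dict.empty, none, [])
  let d := pvFlushA st.1 st.2.1 st.2.2                    -- 'Add last section'
  let d := pvCleanupA d
  d.items.filter (fun kv => kv.2 ≠ "")                    -- '{k: v for k, v in sections.items() if v}'

-- ===== PORT B =====
-- phase 1 of Source B: group lines into (header, block) segments; cur is the open segment (None before the first header)
def pvSegsB : List String → Option (String × List String) → List (String × List String)
  | [], none => []
  | [], some seg => [seg]
  | l :: ls, cur =>
    if PySem.Str.startswith l "## " then
      (match cur with | none => [] | some seg => [seg]) ++ pvSegsB ls (some (l, []))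
    else
      match cur with
      | none => pvSegsB ls none
      | some (h, acc) => pvSegsB ls (some (h, acc ++ [l]))

-- Source B's if/elif classification of a header line
def pvClassifyB (h : String) : Option String :=
  if PySem.Str.startswith h "## Implementation Steps" then some "implementation"
  else if PySem.Str.startswith h "## Files Changed" then some "files_changed"
  else if PySem.Str.startswith h "## Testing" then some "testing"
  else none

-- phase 2 of Source B: one segment into the sections dict ('kept' inlined)
def pvStepB (d : PySem.Dict String String) (seg : String × List String) : PySem.Dict String String :=
  match pvClassifyB seg.1 with
  | none => d
  | some k =>
    if seg.2.filter (fun l => ¬ PySem.Str.startswith l "**") ≠ [] then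
      d.insert k (PySem.Str.strip
        (PySem.Str.join "\n" (seg.2.filter (fun l => ¬ PySem.Str.startswith l "**"))))
    else d

-- Source B's placeholder test (without the redundant not-line disjunct A carries)
def pvCondB (t : String) : Bool :=
  if PySem.Str.isIn "[" t && PySem.Str.isIn "]" t then
    ((((PySem.Str.split? t "\n").getD []).map PySem.Str.strip).filter (fun l => l ≠ "")).all
      (fun l => PySem.Str.startswith l "[" || PySem.Str.startswith l "-")
  else false

def extract_change_sections_py_alt (content : String) : List (String × String) :=
  let segs := pvSegsB ((PySem.Str.split? content "\n").getD []) none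
  let d := segs.foldl pvStepB PySem.Dict.empty
  let d := d.items.foldl (fun d kv => if pvCondB kv.2 then d.insert kv.1 "" else d) d
  d.items.filter (fun kv => kv.2 ≠ "")

-- ===== PRECONDITION & SPEC =====
-- A raises on no input (split/startswith/join/strip are total), so Pre_ is the trivial
-- condition: it excludes nothing.
def Pre_extract_change_sections_py (content : String) : Prop :=
  -- the headers A recognises are "## Implementation Steps", "## Files Changed",
  -- "## Testing Performed" and "## Testing"; no shape of content is excluded
  True
instance (content : String) : Decidable (Pre_extract_change_sections_py content) := by unfold Pre_extract_change_sections_py; infer_instance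
def pvWitness_extract_change_sections_py : String := "## Testing\nok"

def Spec_extract_change_sections_py (content : String) (out : List (String × String)) : Prop := out = extract_change_sections_py_alt content
instance (content : String) (out : List (String × String)) : Decidable (Spec_extract_change_sections_py content out) := by unfold Spec_extract_change_sections_py; infer_instance

-- ===== CLAIM (what is proved, stated in full; the proofs are below) =====
def Claim_equal_extract_change_sections_py : Prop := ∀ (content : String), Dom_extract_change_sections_py content → Pre_extract_change_sections_py content → Spec_extract_change_sections_py content (extract_change_sections_py content)

-- ===== LEMMAS AND PROOFS =====

-- relation between A's loop state and B's open segment (proof-only helper)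
def pvRel (cur : Option String) (acc : List String) (seg : Option (String × List String)) : Prop :=
  match seg with
  | none => cur = none
  | some (h, bacc) =>
    match pvClassifyB h with
    | none => cur = none
    | some k => cur = some k ∧ acc = bacc.filter (fun l => ¬ PySem.Str.startswith l "**")

-- startswith is monotone in the prefix: if p is a prefix of q and l starts with q, l starts with p
lemma pv_startswith_trans (l p q : String) (hpq : p.toList <+: q.toList)
    (h : PySem.Str.startswith l q = true) : PySem.Str.startswith l p = true := by
  simp only [PySem.Str.startswith_eq] at *
  exact (PySem.Chars.startswith_iff _ _).mpr (hpq.trans ((PySem.Chars.startswith_iff _ _).mp h))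

lemma pv_hash_of_impl {l : String} (h : PySem.Str.startswith l "## Implementation Steps" = true) :
    PySem.Str.startswith l "## " = true := pv_startswith_trans l _ _ (by decide) h

lemma pv_hash_of_files {l : String} (h : PySem.Str.startswith l "## Files Changed" = true) :
    PySem.Str.startswith l "## " = true := pv_startswith_trans l _ _ (by decide) h

lemma pv_testing_of_perf {l : String} (h : PySem.Str.startswith l "## Testing Performed" = true) :
    PySem.Str.startswith l "## Testing" = true := pv_startswith_trans l _ _ (by decide) h

lemma pv_hash_of_testing {l : String} (h : PySem.Str.startswith l "## Testing" = true) :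
    PySem.Str.startswith l "## " = true := pv_startswith_trans l _ _ (by decide) h

-- the two placeholder tests agree: every line in A's all(...) is non-empty, so the redundant not-line disjunct never fires
lemma pv_all_or_empty (p : String → Bool) (ls : List String) (h : ∀ l ∈ ls, l ≠ "") :
    ls.all (fun l => p l || l == "") = ls.all p := by
  induction ls with
  | nil => rfl
  | cons a as ih =>
    have ha : (a == "") = false := by
      simpa using h a (List.mem_cons_self)
    simp only [List.all_cons, ha, Bool.or_false, ih (fun l hl => h l (List.mem_cons_of_mem _ hl))]

lemma condA_eq_condB (c : String) : pvCondA c = pvCondB c := by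
  unfold pvCondA pvCondB
  split_ifs with h
  · exact pv_all_or_empty _ _ (fun l hl => by
      have := (List.mem_filter.mp hl).2
      simpa using this)
  · rfl

-- classify only produces the three non-empty literals
lemma pv_classify_ne_empty {h : String} {k : String} (hc : pvClassifyB h = some k) : k ≠ "" := by
  unfold pvClassifyB at hc
  split_ifs at hc
  · injection hc with hh; subst hh; decide
  · injection hc with hh; subst hh; decide
  · injection hc with hh; subst hh; decide

-- appending one line to a block commutes with the '**' filter
lemma pv_snoc_filter (p : String → Bool) (acc : List String) (l : String) :
    (acc ++ [l]).filter p = if p l then acc.filter p ++ [l] else acc.filter p := by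
  rw [List.filter_append]; by_cases h : p l <;> simp [h]

-- step lemmas for B's segmentation
lemma segsB_cons_header (l : String) (ls : List String) (seg : Option (String × List String))
    (h : PySem.Str.startswith l "## " = true) :
    pvSegsB (l :: ls) seg =
      (match seg with | none => ([] : List (String × List String)) | some s => [s])
        ++ pvSegsB ls (some (l, [])) := by
  cases seg with
  | none => dsimp only [pvSegsB]; rw [if_pos h]
  | some s => dsimp only [pvSegsB]; rw [if_pos h]

lemma segsB_cons_plain_none (l : String) (ls : List String)
    (h : ¬ PySem.Str.startswith l "## " = true) :
    pvSegsB (l :: ls) none = pvSegsB ls none := by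
  dsimp only [pvSegsB]; rw [if_neg h]

lemma segsB_cons_plain_some (l : String) (ls : List String) (hd : String) (acc : List String)
    (h : ¬ PySem.Str.startswith l "## " = true) :
    pvSegsB (l :: ls) (some (hd, acc)) = pvSegsB ls (some (hd, acc ++ [l])) := by
  dsimp only [pvSegsB]; rw [if_neg h]

-- step lemmas for A's loop on an ordinary (non-header) line
lemma pv_stepA_plain_none (d : PySem.Dict String String) (acc : List String) (l : String)
    (h1 : ¬ PySem.Str.startswith l "## Implementation Steps" = true)
    (h2 : ¬ PySem.Str.startswith l "## Files Changed" = true)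
    (h3 : ¬ (PySem.Str.startswith l "## Testing Performed" || PySem.Str.startswith l "## Testing") = true)
    (h4 : ¬ PySem.Str.startswith l "## " = true) :
    pvStepA (d, none, acc) l = (d, none, acc) := by
  dsimp only [pvStepA]; rw [if_neg h1, if_neg h2, if_neg h3, if_neg h4]

lemma pv_stepA_plain_some (d : PySem.Dict String String) (k : String) (acc : List String) (l : String)
    (h1 : ¬ PySem.Str.startswith l "## Implementation Steps" = true)
    (h2 : ¬ PySem.Str.startswith l "## Files Changed" = true)
    (h3 : ¬ (PySem.Str.startswith l "## Testing Performed" || PySem.Str.startswith l "## Testing") = true)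
    (h4 : ¬ PySem.Str.startswith l "## " = true) :
    pvStepA (d, some k, acc) l =
      (d, some k, if ¬ PySem.Str.startswith l "**" then acc ++ [l] else acc) := by
  dsimp only [pvStepA]; rw [if_neg h1, if_neg h2, if_neg h3, if_neg h4]

-- closing the open state gives the same dict on both sides
lemma flush_eq_close (d : PySem.Dict String String) (cur : Option String) (acc : List String)
    (seg : Option (String × List String)) (hrel : pvRel cur acc seg) :
    pvFlushA d cur acc =
      (match seg with | none => ([] : List (String × List String)) | some s => [s]).foldl pvStepB d := by
  match seg with
  | none =>
    dsimp only [pvRel] at hrel; subst hrel; rfl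
  | some (h, bacc) =>
    dsimp only [pvRel] at hrel
    simp only [List.foldl_cons, List.foldl_nil]
    unfold pvStepB
    dsimp only
    cases hc : pvClassifyB h with
    | none =>
      rw [hc] at hrel; dsimp only at hrel; subst hrel; rfl
    | some k =>
      rw [hc] at hrel; dsimp only at hrel
      obtain ⟨hcur, hacc⟩ := hrel
      subst hcur; subst hacc
      unfold pvFlushA
      have hk : k ≠ "" := pv_classify_ne_empty hc
      dsimp only
      by_cases hne : bacc.filter (fun l => ¬ PySem.Str.startswith l "**") = []
      · rw [if_neg (fun hcc => hcc.2 hne), if_neg (fun hcc => hcc hne)]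
      · rw [if_pos ⟨hk, hne⟩, if_pos hne]

-- main loop lemma: A's fold + final flush = B's fold over the segments
lemma loop_eq (ls : List String) (d : PySem.Dict String String) (cur : Option String)
    (acc : List String) (seg : Option (String × List String)) (hrel : pvRel cur acc seg) :
    (fun st => pvFlushA st.1 st.2.1 st.2.2) (ls.foldl pvStepA (d, cur, acc)) =
      (pvSegsB ls seg).foldl pvStepB d := by
  induction ls generalizing d cur acc seg with
  | nil =>
    simp only [List.foldl_nil]
    have := flush_eq_close d cur acc seg hrel
    match seg with
    | none => simpa using this
    | some s => simpa [pvSegsB] using this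
  | cons l ls ih =>
    simp only [List.foldl_cons]
    by_cases h1 : PySem.Str.startswith l "## Implementation Steps"
    · have hcl : pvClassifyB l = some "implementation" := by
        unfold pvClassifyB; rw [if_pos h1]
      have hstep : pvStepA (d, cur, acc) l = (pvFlushA d cur acc, some "implementation", []) := by
        dsimp only [pvStepA]; rw [if_pos h1]
      rw [hstep, segsB_cons_header l ls seg (pv_hash_of_impl h1), List.foldl_append,
          ← flush_eq_close d cur acc seg hrel]
      exact ih _ _ _ _ (by dsimp only [pvRel]; rw [hcl]; exact ⟨rfl, rfl⟩)
    · by_cases h2 : PySem.Str.startswith l "## Files Changed"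
      · have hcl : pvClassifyB l = some "files_changed" := by
          unfold pvClassifyB; rw [if_neg h1, if_pos h2]
        have hstep : pvStepA (d, cur, acc) l = (pvFlushA d cur acc, some "files_changed", []) := by
          dsimp only [pvStepA]; rw [if_neg h1, if_pos h2]
        rw [hstep, segsB_cons_header l ls seg (pv_hash_of_files h2), List.foldl_append,
            ← flush_eq_close d cur acc seg hrel]
        exact ih _ _ _ _ (by dsimp only [pvRel]; rw [hcl]; exact ⟨rfl, rfl⟩)
      · by_cases h3 : PySem.Str.startswith l "## Testing Performed" || PySem.Str.startswith l "## Testing"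
        · have hT : PySem.Str.startswith l "## Testing" = true := by
            rcases Bool.or_eq_true_iff.mp h3 with hP | hT
            · exact pv_testing_of_perf hP
            · exact hT
          have hcl : pvClassifyB l = some "testing" := by
            unfold pvClassifyB; rw [if_neg h1, if_neg h2, if_pos hT]
          have hstep : pvStepA (d, cur, acc) l = (pvFlushA d cur acc, some "testing", []) := by
            dsimp only [pvStepA]; rw [if_neg h1, if_neg h2, if_pos h3]
          rw [hstep, segsB_cons_header l ls seg (pv_hash_of_testing hT), List.foldl_append,
              ← flush_eq_close d cur acc seg hrel]
          exact ih _ _ _ _ (by dsimp only [pvRel]; rw [hcl]; exact ⟨rfl, rfl⟩)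
        · have hor := Bool.eq_false_iff.mpr h3
          obtain ⟨hPf, hTf⟩ := Bool.or_eq_false_iff.mp hor
          have hTn : ¬ PySem.Str.startswith l "## Testing" = true := by
            rw [hTf]; exact Bool.false_ne_true
          by_cases h4 : PySem.Str.startswith l "## "
          · have hcl : pvClassifyB l = none := by
              unfold pvClassifyB; rw [if_neg h1, if_neg h2, if_neg hTn]
            have hstep : pvStepA (d, cur, acc) l = (pvFlushA d cur acc, none, []) := by
              dsimp only [pvStepA]; rw [if_neg h1, if_neg h2, if_neg h3, if_pos h4]
            rw [hstep, segsB_cons_header l ls seg h4, List.foldl_append,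
                ← flush_eq_close d cur acc seg hrel]
            exact ih _ _ _ _ (by dsimp only [pvRel]; rw [hcl])
          · -- ordinary line: no header branch fires
            match seg with
            | none =>
              have hcur : cur = none := hrel
              subst hcur
              rw [pv_stepA_plain_none d acc l h1 h2 h3 h4, segsB_cons_plain_none l ls h4]
              exact ih _ _ _ _ (by dsimp only [pvRel])
            | some (hd, bacc) =>
              rw [segsB_cons_plain_some l ls hd bacc h4]
              dsimp only [pvRel] at hrel
              cases hc : pvClassifyB hd with
              | none =>
                rw [hc] at hrel; dsimp only at hrel; subst hrel
                rw [pv_stepA_plain_none d acc l h1 h2 h3 h4]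
                exact ih _ _ _ _ (by dsimp only [pvRel]; rw [hc])
              | some k =>
                rw [hc] at hrel; dsimp only at hrel
                obtain ⟨hcur, hacc⟩ := hrel
                subst hcur; subst hacc
                rw [pv_stepA_plain_some d k _ l h1 h2 h3 h4]
                refine ih _ _ _ _ ?_
                dsimp only [pvRel]; rw [hc]
                refine ⟨rfl, ?_⟩
                rw [pv_snoc_filter]
                split_ifs with hA hB hB <;>
                  first
                  | rfl
                  | exact absurd hA (of_decide_eq_true hB)
                  | exact absurd (decide_eq_true hA) hB

-- B's fold keeps the keys duplicate-free
lemma nodup_keys_foldB (segs : List (String × List String)) (d : PySem.Dict String String)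
    (h : d.keys.Nodup) : (segs.foldl pvStepB d).keys.Nodup := by
  induction segs generalizing d with
  | nil => exact h
  | cons s ss ih =>
    refine ih _ ?_
    unfold pvStepB
    cases pvClassifyB s.1 with
    | none => exact h
    | some k =>
      dsimp only
      split
      · exact PySem.Dict.nodup_keys_insert _ _ _ h
      · exact h

-- Dict eta
lemma pv_dict_eta (d : PySem.Dict String String) : PySem.Dict.mk d.items = d := by
  cases d; rfl

-- inserting under a different key commutes with a cons'd head item
lemma pv_insert_mk_cons (x : String × String) (rest : List (String × String)) (k v : String)
    (hk : k ≠ x.1) :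
    (PySem.Dict.mk (x :: rest)).insert k v =
      PySem.Dict.mk (x :: ((PySem.Dict.mk rest).insert k v).items) := by
  have hx : (x.1 == k) = false := by
    simp only [beq_eq_false_iff_ne, ne_eq]
    exact fun hh => hk hh.symm
  have hcont : (PySem.Dict.mk (x :: rest)).contains k = (PySem.Dict.mk rest).contains k := by
    simp [PySem.Dict.contains_mk, hx]
  by_cases hc : (PySem.Dict.mk rest).contains k = true
  · apply PySem.Dict.ext
    rw [PySem.Dict.items_insert_of_contains _ _ (hcont.trans hc),
        PySem.Dict.items_insert_of_contains _ _ hc]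
    show (x :: rest).map (fun p => if (p.1 == k) = true then (k, v) else p) = _
    rw [List.map_cons, if_neg (by rw [hx]; exact Bool.false_ne_true)]
  · have hc' : (PySem.Dict.mk rest).contains k = false := by
      cases hcc : (PySem.Dict.mk rest).contains k
      · rfl
      · exact absurd hcc hc
    apply PySem.Dict.ext
    rw [PySem.Dict.items_insert_of_not_contains _ _ (hcont.trans hc'),
        PySem.Dict.items_insert_of_not_contains _ _ hc']
    rfl

-- zeroing the head item of the dict itself
lemma pv_head_zero (cond : String → Bool) (kv : String × String) (rest : List (String × String))
    (hnd : kv.1 ∉ rest.map Prod.fst) :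
    (if cond kv.2 then (PySem.Dict.mk (kv :: rest)).insert kv.1 "" else PySem.Dict.mk (kv :: rest)) =
      PySem.Dict.mk ((if cond kv.2 then (kv.1, "") else kv) :: rest) := by
  by_cases hcond : cond kv.2
  · rw [if_pos hcond, if_pos hcond]
    have hcont : (PySem.Dict.mk (kv :: rest)).contains kv.1 = true := by
      simp [PySem.Dict.contains_mk]
    apply PySem.Dict.ext
    rw [PySem.Dict.items_insert_of_contains _ _ hcont]
    show (kv :: rest).map (fun p => if (p.1 == kv.1) = true then (kv.1, "") else p) = _
    rw [List.map_cons, if_pos (by exact beq_self_eq_true kv.1)]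
    have hrest : ∀ p ∈ rest, (if (p.1 == kv.1) = true then ((kv.1, "") : String × String) else p) = p := by
      intro p hp
      rw [if_neg]
      intro hb
      exact hnd ((eq_of_beq hb) ▸ List.mem_map_of_mem hp)
    rw [List.map_congr_left hrest]
    simp
  · rw [if_neg hcond, if_neg hcond]

-- A's cleanup fold, pushed past a head item whose key it never visits
lemma pv_foldlA_cons (cond : String → Bool) (ks : List String) (y : String × String)
    (rest : List (String × String)) (h : ∀ k ∈ ks, k ≠ y.1) :
    ks.foldl (fun d k =>
      match d.get? k with
      | some c => if cond c then d.insert k "" else d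
      | none => d) (PySem.Dict.mk (y :: rest)) =
      PySem.Dict.mk (y :: (ks.foldl (fun d k =>
        match d.get? k with
        | some c => if cond c then d.insert k "" else d
        | none => d) (PySem.Dict.mk rest)).items) := by
  induction ks generalizing rest with
  | nil => simp
  | cons k ks ih =>
    have hky : k ≠ y.1 := h k List.mem_cons_self
    have hbeq : (y.1 == k) = false := by
      simp only [beq_eq_false_iff_ne, ne_eq]
      exact fun hh => hky hh.symm
    have hget : (PySem.Dict.mk (y :: rest)).get? k = (PySem.Dict.mk rest).get? k := by
      cases y with
      | mk y1 y2 =>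
        have hbeq' : (y1 == k) = false := hbeq
        rw [PySem.Dict.get?_mk_cons, hbeq', if_neg (by exact Bool.false_ne_true)]
    simp only [List.foldl_cons]
    rw [hget]
    cases hg : (PySem.Dict.mk rest).get? k with
    | none =>
      dsimp only
      exact ih _ (fun a ha => h a (List.mem_cons_of_mem _ ha))
    | some c =>
      dsimp only
      by_cases hcond : cond c
      · rw [if_pos hcond, if_pos hcond, pv_insert_mk_cons y rest k "" hky]
        have := ih (((PySem.Dict.mk rest).insert k "").items)
          (fun a ha => h a (List.mem_cons_of_mem _ ha))
        rw [pv_dict_eta] at this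
        exact this
      · rw [if_neg hcond, if_neg hcond]
        exact ih _ (fun a ha => h a (List.mem_cons_of_mem _ ha))

-- B's cleanup fold, pushed past a head item whose key it never visits
lemma pv_foldlB_cons (cond : String → Bool) (ps : List (String × String)) (y : String × String)
    (rest : List (String × String)) (h : ∀ p ∈ ps, p.1 ≠ y.1) :
    ps.foldl (fun d kv => if cond kv.2 then d.insert kv.1 "" else d) (PySem.Dict.mk (y :: rest)) =
      PySem.Dict.mk (y :: (ps.foldl (fun d kv => if cond kv.2 then d.insert kv.1 "" else d)
        (PySem.Dict.mk rest)).items) := by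
  induction ps generalizing rest with
  | nil => simp
  | cons p ps ih =>
    have hpy : p.1 ≠ y.1 := h p List.mem_cons_self
    simp only [List.foldl_cons]
    by_cases hcond : cond p.2
    · rw [if_pos hcond, if_pos hcond, pv_insert_mk_cons y rest p.1 "" hpy]
      have := ih (((PySem.Dict.mk rest).insert p.1 "").items)
        (fun a ha => h a (List.mem_cons_of_mem _ ha))
      rw [pv_dict_eta] at this
      exact this
    · rw [if_neg hcond, if_neg hcond]
      exact ih _ (fun a ha => h a (List.mem_cons_of_mem _ ha))

-- A's cleanup rewrites the items pointwise
lemma cleanupA_eq (l : List (String × String)) (hnd : (l.map Prod.fst).Nodup) :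
    pvCleanupA (PySem.Dict.mk l) =
      PySem.Dict.mk (l.map (fun kv => if pvCondA kv.2 then (kv.1, "") else kv)) := by
  unfold pvCleanupA
  rw [show (PySem.Dict.mk l).keys = l.map Prod.fst from rfl]
  induction l with
  | nil => simp
  | cons kv rest ih =>
    rw [List.map_cons] at hnd
    obtain ⟨hhd, hrest⟩ := List.nodup_cons.mp hnd
    simp only [List.map_cons, List.foldl_cons]
    have hget : (PySem.Dict.mk (kv :: rest)).get? kv.1 = some kv.2 := by
      cases kv with
      | mk k1 k2 =>
        rw [PySem.Dict.get?_mk_cons, if_pos (by exact beq_self_eq_true k1)]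
    rw [hget]
    dsimp only
    rw [pv_head_zero pvCondA kv rest hhd]
    have hyfst : (if pvCondA kv.2 then ((kv.1, "") : String × String) else kv).1 = kv.1 := by
      split <;> rfl
    have harg : ∀ k ∈ rest.map Prod.fst, k ≠ (if pvCondA kv.2 then ((kv.1, "") : String × String) else kv).1 := by
      intro k hk
      rw [hyfst]
      exact fun he => hhd (he ▸ hk)
    rw [pv_foldlA_cons pvCondA (rest.map Prod.fst) _ rest harg, ih hrest]

-- B's cleanup rewrites the items pointwise
lemma cleanupB_eq (l : List (String × String)) (hnd : (l.map Prod.fst).Nodup) :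
    l.foldl (fun d kv => if pvCondB kv.2 then d.insert kv.1 "" else d) (PySem.Dict.mk l) =
      PySem.Dict.mk (l.map (fun kv => if pvCondB kv.2 then (kv.1, "") else kv)) := by
  induction l with
  | nil => simp
  | cons kv rest ih =>
    rw [List.map_cons] at hnd
    obtain ⟨hhd, hrest⟩ := List.nodup_cons.mp hnd
    simp only [List.foldl_cons, List.map_cons]
    rw [show (if pvCondB kv.2 then (PySem.Dict.mk (kv :: rest)).insert kv.1 "" else PySem.Dict.mk (kv :: rest)) =
      PySem.Dict.mk ((if pvCondB kv.2 then (kv.1, "") else kv) :: rest) from pv_head_zero pvCondB kv rest hhd]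
    have hyfst : (if pvCondB kv.2 then ((kv.1, "") : String × String) else kv).1 = kv.1 := by
      split <;> rfl
    have harg : ∀ p ∈ rest, p.1 ≠ (if pvCondB kv.2 then ((kv.1, "") : String × String) else kv).1 := by
      intro p hp
      rw [hyfst]
      exact fun he => hhd (he ▸ List.mem_map_of_mem hp)
    rw [pv_foldlB_cons pvCondB rest _ rest harg, ih hrest]

-- ===== VERDICT (by name: the statement is the Claim_ definition above) =====
theorem extract_change_sections_py_spec : Claim_equal_extract_change_sections_py := by
  intro content _ _
  show extract_change_sections_py content = extract_change_sections_py_alt content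
  unfold extract_change_sections_py extract_change_sections_py_alt
  dsimp only
  set lines := (PySem.Str.split? content "\n").getD [] with hlines
  have hloop := loop_eq lines PySem.Dict.empty none [] none rfl
  dsimp only at hloop
  rw [hloop]
  set dB := (pvSegsB lines none).foldl pvStepB PySem.Dict.empty with hdB
  have hnodup : (dB.items.map Prod.fst).Nodup := by
    have := nodup_keys_foldB (pvSegsB lines none) PySem.Dict.empty PySem.Dict.nodup_keys_empty
    rw [← hdB] at this
    exact this
  have hA : pvCleanupA dB = PySem.Dict.mk (dB.items.map (fun kv => if pvCondA kv.2 then (kv.1, "") else kv)) := by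
    rw [← pv_dict_eta dB]
    exact cleanupA_eq dB.items hnodup
  have hB : dB.items.foldl (fun d kv => if pvCondB kv.2 then d.insert kv.1 "" else d) dB =
      PySem.Dict.mk (dB.items.map (fun kv => if pvCondB kv.2 then (kv.1, "") else kv)) := by
    have := cleanupB_eq dB.items hnodup
    rw [pv_dict_eta] at this
    exact this
  rw [hA, hB]
  have hmap : dB.items.map (fun kv => if pvCondA kv.2 then (kv.1, "") else kv) =
      dB.items.map (fun kv => if pvCondB kv.2 then (kv.1, "") else kv) :=
    List.map_congr_left (fun kv _ => by rw [condA_eq_condB])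
  rw [hmap]
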